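-- pv_equiv track=rewrite | github.com/mssoftware-ms/07_OrderPilot-AI | scripts/rebuild_backtest_tab_main.py | extract_methods_to_keep
-- ===== SOURCE A (Python) =====
-- MIXIN_METHODS = {
--     # UI Setup Mixin
--     '_setup_ui', '_create_compact_button_row', '_create_setup_tab',
--     '_create_execution_tab', '_create_kpi_card',
--
--     # UI Results Mixin
--     '_create_results_tab', '_update_metrics_table', '_update_trades_table',
--     '_update_breakdown_table',
--
--     # UI Batch Mixin
--     '_create_batch_tab', '_update_batch_results_table', '_update_wf_results_table',
--
--     # Callbacks Mixin
--     '_on_batch_btn_clicked', '_on_wf_btn_clicked', '_on_save_template_clicked',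
--     '_on_load_template_clicked', '_on_derive_variant_clicked',
--     '_on_auto_generate_clicked', '_on_load_configs_clicked', '_on_indicator_set_changed',
--
--     # Config Mixin
--     'collect_engine_configs', '_get_default_engine_configs', '_build_backtest_config',
--     '_build_entry_config', 'get_parameter_specification', 'get_parameter_space_from_configs',
--     '_convert_v2_to_parameters', '_get_nested_value',
--
--     # Update Mixin
--     '_on_progress_updated', '_on_log_message', '_log',
--
--     # Export Mixin
--     '_export_csv', '_export_equity_csv', '_export_json', '_export_batch_results',
--     '_export_variants_json',
-- }
--
-- def extract_methods_to_keep(source_lines):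
--     """Extract methods that should stay in main file."""
--     methods_content = []
--     current_method = []
--     in_method = False
--     method_name = None
--     method_indent = None
--
--     for i, line in enumerate(source_lines):
--         # Check if starting new method
--         if line.strip().startswith('def '):
--             # Save previous method if it should be kept
--             if current_method and method_name and method_name not in MIXIN_METHODS:
--                 methods_content.extend(current_method)
--                 methods_content.append('\n')
--
--             # Start new method
--             current_method = [line]
--             in_method = True
--             method_name = line.strip().split('(')[0].replace('def ', '')
--             method_indent = len(line) - len(line.lstrip())
--
--         elif in_method:
--             current_line_indent = len(line) - len(line.lstrip())
--
--             # Check if we're still in the method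
--             if line.strip() and current_line_indent <= method_indent:
--                 # End of method
--                 if method_name not in MIXIN_METHODS:
--                     methods_content.extend(current_method)
--                     methods_content.append('\n')
--                 current_method = []
--                 in_method = False
--                 method_name = None
--
--                 # This line might be start of new method
--                 if line.strip().startswith('def '):
--                     current_method = [line]
--                     in_method = True
--                     method_name = line.strip().split('(')[0].replace('def ', '')
--                     method_indent = len(line) - len(line.lstrip())
--             else:
--                 # Continue current method
--                 current_method.append(line)
--
--     # Don't forget last method
--     if current_method and method_name and method_name not in MIXIN_METHODS:
--         methods_content.extend(current_method)
--
--     return methods_content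
-- ===== SOURCE B (Python) =====
-- MIXIN_METHODS = {
--     '_setup_ui', '_create_compact_button_row', '_create_setup_tab',
--     '_create_execution_tab', '_create_kpi_card',
--     '_create_results_tab', '_update_metrics_table', '_update_trades_table',
--     '_update_breakdown_table',
--     '_create_batch_tab', '_update_batch_results_table', '_update_wf_results_table',
--     '_on_batch_btn_clicked', '_on_wf_btn_clicked', '_on_save_template_clicked',
--     '_on_load_template_clicked', '_on_derive_variant_clicked',
--     '_on_auto_generate_clicked', '_on_load_configs_clicked', '_on_indicator_set_changed',
--     'collect_engine_configs', '_get_default_engine_configs', '_build_backtest_config',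
--     '_build_entry_config', 'get_parameter_specification', 'get_parameter_space_from_configs',
--     '_convert_v2_to_parameters', '_get_nested_value',
--     '_on_progress_updated', '_on_log_message', '_log',
--     '_export_csv', '_export_equity_csv', '_export_json', '_export_batch_results',
--     '_export_variants_json',
-- }
--
--
-- def extract_methods_to_keep(source_lines):
--     """Two-pass rewrite: parse the source into method blocks, then render the kept ones."""
--     # Pass 1: collect blocks as (name, lines); remember whether the last one ran to EOF.
--     blocks = []
--     current = None  # (name, indent, lines) of the open block
--     for line in source_lines:
--         stripped = line.strip()
--         if stripped.startswith('def '):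
--             if current is not None:
--                 blocks.append((current[0], current[2]))
--             name = stripped.split('(')[0].replace('def ', '')
--             current = (name, len(line) - len(line.lstrip()), [line])
--         elif current is not None:
--             if not stripped or len(line) - len(line.lstrip()) > current[1]:
--                 current[2].append(line)
--             else:
--                 blocks.append((current[0], current[2]))
--                 current = None
--     open_at_eof = current is not None
--     if current is not None:
--         blocks.append((current[0], current[2]))
--
--     # Pass 2: emit kept blocks; every kept block is followed by '\n' except a
--     # final block that was still open at end of file.
--     out = []
--     for k, (name, lines) in enumerate(blocks):
--         if name and name not in MIXIN_METHODS:
--             out.extend(lines)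
--             if not (open_at_eof and k == len(blocks) - 1):
--                 out.append('\n')
--     return out
-- ===== Notes on version B (the rewrite author's own statement) =====
-- stated objective: simpler
-- what changed: A interleaves filtering and output inside one stateful scan with a duplicated flush; B separates concerns into two passes: parse the source into a list of (name, lines) method blocks plus an open-at-EOF flag, then filter out mixin names and join the kept blocks with '\n' separators (the final block gets none when it ran to EOF).
-- outside the precondition, e.g. on extract_methods_to_keep(['def (:', 'x']): A returns ['def (:', '\n'], B returns []
import Mathlib
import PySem

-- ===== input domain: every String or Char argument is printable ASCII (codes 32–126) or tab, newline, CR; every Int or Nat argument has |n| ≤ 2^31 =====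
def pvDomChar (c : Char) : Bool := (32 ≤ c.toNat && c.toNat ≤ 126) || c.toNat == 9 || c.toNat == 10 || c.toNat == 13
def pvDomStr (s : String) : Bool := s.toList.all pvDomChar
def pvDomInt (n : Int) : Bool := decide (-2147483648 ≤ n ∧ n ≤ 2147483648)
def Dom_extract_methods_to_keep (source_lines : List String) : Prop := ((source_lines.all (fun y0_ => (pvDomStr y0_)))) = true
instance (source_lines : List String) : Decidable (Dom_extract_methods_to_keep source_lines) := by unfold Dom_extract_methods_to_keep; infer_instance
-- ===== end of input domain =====

-- B separates parsing (collect method blocks) from rendering (filter + join); objective: simpler two-pass decomposition, equal cost.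


-- shared module constant MIXIN_METHODS (a Python set of string literals)
def mixinMethods : List String :=
  ["_setup_ui", "_create_compact_button_row", "_create_setup_tab",
   "_create_execution_tab", "_create_kpi_card",
   "_create_results_tab", "_update_metrics_table", "_update_trades_table",
   "_update_breakdown_table",
   "_create_batch_tab", "_update_batch_results_table", "_update_wf_results_table",
   "_on_batch_btn_clicked", "_on_wf_btn_clicked", "_on_save_template_clicked",
   "_on_load_template_clicked", "_on_derive_variant_clicked",
   "_on_auto_generate_clicked", "_on_load_configs_clicked", "_on_indicator_set_changed",
   "collect_engine_configs", "_get_default_engine_configs", "_build_backtest_config",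
   "_build_entry_config", "get_parameter_specification", "get_parameter_space_from_configs",
   "_convert_v2_to_parameters", "_get_nested_value",
   "_on_progress_updated", "_on_log_message", "_log",
   "_export_csv", "_export_equity_csv", "_export_json", "_export_batch_results",
   "_export_variants_json"]

-- line.strip().split('(')[0].replace('def ', '')  (split('(') is never empty, so [0] = headD)
def pyName (line : String) : String :=
  PySem.Str.replace (((PySem.Str.split? (PySem.Str.strip line) "(").getD []).headD "") "def " ""

-- len(line) - len(line.lstrip())
def pyIndent (line : String) : Int :=
  PySem.Str.len line - PySem.Str.len (PySem.Str.lstrip line)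

-- ===== PORT A =====
-- Python truthiness of method_name (None or '' is falsy)
def mnTruthy : Option String → Bool
  | none => false
  | some s => s != ""

-- 'method_name not in MIXIN_METHODS' (None is not in the set)
def mnNotMixin : Option String → Bool
  | none => true
  | some s => !(mixinMethods.contains s)

-- the for-loop of A, carrying (methods_content, current_method, in_method, method_name, method_indent)
def loopA : List String → List String → List String → Bool → Option String → Option Int → List String
  | [], mc, cm, _, mn, _ =>
      -- final flush: if current_method and method_name and method_name not in MIXIN_METHODS
      if cm ≠ [] && mnTruthy mn && mnNotMixin mn then mc ++ cm else mc
  | line :: rest, mc, cm, inm, mn, mi =>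
      if PySem.Str.startswith (PySem.Str.strip line) "def " then
        let mc' := if cm ≠ [] && mnTruthy mn && mnNotMixin mn then mc ++ cm ++ ["\n"] else mc
        loopA rest mc' [line] true (some (pyName line)) (some (pyIndent line))
      else if inm then
        match mi with
        | some ind =>
            if PySem.Str.strip line ≠ "" && pyIndent line ≤ ind then
              let mc' := if mnNotMixin mn then mc ++ cm ++ ["\n"] else mc
              -- 'this line might be start of new method' (dead re-check, kept from A)
              if PySem.Str.startswith (PySem.Str.strip line) "def " then
                loopA rest mc' [line] true (some (pyName line)) (some (pyIndent line))
              else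
                loopA rest mc' [] false none none
            else
              loopA rest mc (cm ++ [line]) inm mn mi
        | none => loopA rest mc (cm ++ [line]) inm mn mi  -- unreachable: in_method implies method_indent set
      else
        loopA rest mc cm inm mn mi

def extract_methods_to_keep (source_lines : List String) : List String :=
  loopA source_lines [] [] false none none

-- ===== PORT B =====
def keepB (n : String) : Bool := n != "" && !(mixinMethods.contains n)

-- pass 1: blocks as (name, lines); the Bool says the last block was still open at EOF
def parseB : List String → Option (String × Int × List String) → List (String × List String) × Bool
  | [], none => ([], false)
  | [], some (n, _, ls) => ([(n, ls)], true)
  | line :: rest, cur =>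
      if PySem.Str.startswith (PySem.Str.strip line) "def " then
        let r := parseB rest (some (pyName line, pyIndent line, [line]))
        match cur with
        | some (n, _, ls) => ((n, ls) :: r.1, r.2)
        | none => r
      else
        match cur with
        | none => parseB rest none
        | some (n, ind, ls) =>
            if PySem.Str.strip line == "" || ind < pyIndent line then
              parseB rest (some (n, ind, ls ++ [line]))
            else
              let r := parseB rest none
              ((n, ls) :: r.1, r.2)

-- pass 2: kept blocks, each followed by '\n' except a final open-at-EOF block
def renderB : List (String × List String) → Bool → List String
  | [], _ => []
  | [(n, ls)], o => if keepB n then ls ++ (if o then [] else ["\n"]) else []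
  | (n, ls) :: b :: bs, o => (if keepB n then ls ++ ["\n"] else []) ++ renderB (b :: bs) o

def extract_methods_to_keep_alt (source_lines : List String) : List String :=
  let r := parseB source_lines none
  renderB r.1 r.2

-- ===== PRECONDITION & SPEC =====
-- Pre_ excludes inputs containing a 'def' line whose derived method name is empty (e.g. 'def (:'):
-- there A's keep-decision is inconsistent (the dedent-close path emits the block, the def-close/EOF
-- paths drop it — an accident of its implementation), a corner nobody would specify; B uniformly drops it.
def Pre_extract_methods_to_keep (source_lines : List String) : Prop :=
  ∀ line ∈ source_lines,
    PySem.Str.startswith (PySem.Str.strip line) "def " = true → pyName line ≠ ""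
instance (source_lines : List String) : Decidable (Pre_extract_methods_to_keep source_lines) := by
  unfold Pre_extract_methods_to_keep; infer_instance

def pvWitness_extract_methods_to_keep : List String :=
  ["def keep_me(self):", "    pass", "", "def _log(self, m):", "    x = 1", "def also_kept(a):", "    return a"]

def Spec_extract_methods_to_keep (source_lines : List String) (out : List String) : Prop := out = extract_methods_to_keep_alt source_lines
instance (source_lines : List String) (out : List String) : Decidable (Spec_extract_methods_to_keep source_lines out) := by unfold Spec_extract_methods_to_keep; infer_instance

-- ===== CLAIM (what is proved, stated in full; the proofs are below) =====
def Claim_equal_extract_methods_to_keep : Prop := ∀ (source_lines : List String), Dom_extract_methods_to_keep source_lines → Pre_extract_methods_to_keep source_lines → Spec_extract_methods_to_keep source_lines (extract_methods_to_keep source_lines)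

-- ===== LEMMAS AND PROOFS =====

-- pass 1 with an open block yields at least one block
theorem parseB_some_ne_nil (lines : List String) (c : String × Int × List String) :
    (parseB lines (some c)).1 ≠ [] := by
  induction lines generalizing c with
  | nil => obtain ⟨n, i, ls⟩ := c; simp [parseB]
  | cons line rest ih =>
      obtain ⟨n, i, ls⟩ := c
      by_cases hdef : PySem.Chars.startswith (PySem.Chars.strip line.toList) ('d'::'e'::'f'::' '::[]) = true
      · simp [parseB, hdef]
      · by_cases hc : PySem.Str.strip line = "" ∨ i < pyIndent line
        · simpa [parseB, hdef, hc] using ih _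
        · simp [parseB, hdef, hc]

-- pass 1 from a closed state: open-at-EOF forces a block
theorem parseB_none_open_ne_nil (lines : List String) :
    (parseB lines none).2 = true → (parseB lines none).1 ≠ [] := by
  induction lines with
  | nil => simp [parseB]
  | cons line rest ih =>
      by_cases hdef : PySem.Chars.startswith (PySem.Chars.strip line.toList) ('d'::'e'::'f'::' '::[]) = true
      · simpa [parseB, hdef] using fun _ => parseB_some_ne_nil rest _
      · simpa [parseB, hdef] using ih

-- rendering a cons when the tail is nonempty or the open flag is off
theorem renderB_cons (n : String) (ls : List String) (bs : List (String × List String)) (o : Bool)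
    (h : bs ≠ [] ∨ o = false) :
    renderB ((n, ls) :: bs) o = (if keepB n then ls ++ ["\n"] else []) ++ renderB bs o := by
  match bs, o with
  | [], true => simp at h
  | [], false => simp [renderB]
  | b :: bs', o => simp [renderB]

-- the main invariant: A's loop state corresponds to B's (finished blocks flushed, open block = cur)
set_option maxHeartbeats 1000000 in
theorem loopA_eq (lines : List String)
    (hpre : Pre_extract_methods_to_keep lines) :
    (∀ mc, loopA lines mc [] false none none
        = mc ++ renderB (parseB lines none).1 (parseB lines none).2)
    ∧ (∀ mc cm n ind, n ≠ "" → cm ≠ [] →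
        loopA lines mc cm true (some n) (some ind)
          = mc ++ renderB (parseB lines (some (n, ind, cm))).1 (parseB lines (some (n, ind, cm))).2) := by
  induction lines with
  | nil =>
      constructor
      · intro mc; simp [loopA, parseB, renderB]
      · intro mc cm n ind hn hcm
        have hkf : (decide (cm ≠ []) && mnTruthy (some n) && mnNotMixin (some n)) = keepB n := by
          simp only [mnTruthy, mnNotMixin, keepB]
          simp [hcm]
        simp only [loopA, parseB, renderB]
        rw [hkf]
        split <;> simp
  | cons line rest ih =>
      have hpre' : Pre_extract_methods_to_keep rest := fun l hl => hpre l (List.mem_cons_of_mem _ hl)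
      have ih1 := (ih hpre').1
      have ih2 := (ih hpre').2
      constructor
      · intro mc
        cases hdef : PySem.Str.startswith (PySem.Str.strip line) "def " with
        | true =>
            have hn : pyName line ≠ "" := hpre line (List.mem_cons_self) hdef
            have hf : (decide (([] : List String) ≠ []) && mnTruthy none && mnNotMixin none) = false := by
              simp
            simp only [loopA, parseB, hdef, if_true]
            rw [hf]
            simp only [Bool.false_eq_true, if_false]
            exact ih2 mc [line] (pyName line) (pyIndent line) hn (by simp)
        | false =>
            simp only [loopA, parseB, hdef, Bool.false_eq_true, if_false]
            exact ih1 mc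
      · intro mc cm n ind hn hcm
        have hkf : (decide (cm ≠ []) && mnTruthy (some n) && mnNotMixin (some n)) = keepB n := by
          simp only [mnTruthy, mnNotMixin, keepB]
          simp [hcm]
        have hk : mnNotMixin (some n) = keepB n := by
          simp only [mnNotMixin, keepB]
          simp [hn]
        cases hdef : PySem.Str.startswith (PySem.Str.strip line) "def " with
        | true =>
            have hn' : pyName line ≠ "" := hpre line (List.mem_cons_self) hdef
            simp only [loopA, parseB, hdef, if_true]
            rw [hkf]
            rw [renderB_cons n cm _ _ (Or.inl (parseB_some_ne_nil _ _))]
            rw [ih2 _ [line] (pyName line) (pyIndent line) hn' (by simp)]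
            split <;> simp
        | false =>
            cases hc : (PySem.Str.strip line == "" || decide (ind < pyIndent line)) with
            | true =>
                -- the line continues the block
                have hA : (decide (PySem.Str.strip line ≠ "") && decide (pyIndent line ≤ ind)) = false := by
                  simp only [Bool.or_eq_true, beq_iff_eq, decide_eq_true_eq] at hc
                  rcases hc with h | h
                  · simp [h]
                  · simp only [Bool.and_eq_false_iff]
                    right
                    simp only [decide_eq_false_iff_not]
                    omega
                simp only [loopA, parseB, hdef, Bool.false_eq_true, if_false, if_true, hc, hA]
                exact ih2 mc (cm ++ [line]) n ind hn (by simp)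
            | false =>
                -- the line closes the block
                have hc' : PySem.Str.strip line ≠ "" ∧ ind ≥ pyIndent line := by
                  simp only [Bool.or_eq_false_iff, beq_eq_false_iff_ne, decide_eq_false_iff_not] at hc
                  exact ⟨hc.1, by omega⟩
                have hA : (decide (PySem.Str.strip line ≠ "") && decide (pyIndent line ≤ ind)) = true := by
                  simp only [Bool.and_eq_true, decide_eq_true_eq]
                  exact ⟨hc'.1, by omega⟩
                simp only [loopA, parseB, hdef, Bool.false_eq_true, if_false, if_true, hc, hA]
                rw [hk]
                rw [renderB_cons n cm _ _ ?side]
                case side =>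
                  rcases h : (parseB rest none).1 with _ | _
                  · right
                    by_contra hopen
                    exact parseB_none_open_ne_nil rest (by simpa using hopen) h
                  · left; simp
                rw [ih1]
                split <;> simp

-- ===== VERDICT (by name: the statement is the Claim_ definition above) =====
theorem extract_methods_to_keep_spec : Claim_equal_extract_methods_to_keep := by
  intro src _hdom hpre
  unfold Spec_extract_methods_to_keep extract_methods_to_keep extract_methods_to_keep_alt
  simpa using (loopA_eq src hpre).1 []
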